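-- pv_equiv track=rewrite | github.com/afonsomatos/ist-fp-pb-2017 | projeto2.py | conjunto_palavras_para_cadeia
-- ===== SOURCE A (Python) =====
-- def palavra_tamanho(pp):
--     """Obtem o tamanho da palavra representada por uma palavra_potencial.
--
--     Args:
--         pp (TAD palavra_potencial)
--
--     Retorna:
--         int: Tamanho da palavra que `pp` representa.
--     """
--
--     return len( palavra_potencial_para_cadeia(pp) )
--
-- def palavra_potencial_para_cadeia(pp):
--     """Obtem a cadeia de caracteres representada por uma palavra_potencial.
--
--     Args:
--         pp (TAD palavra_potencial)
--
--     Retorna: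
--         str: Palavra que `pp` representa.
--     """
--
--     return pp[0]
--
-- def conjunto_palavras_para_cadeia(cp):
--     """Obtem a representacao em string de um conjunto_palavras.
--
--     Args:
--         cp (TAD conjunto_palavras)
--
--     Retorna:
--         str: Representacao de `cp` em cadeia de caracteres.
--     """
--
--     palavras = {}
--
--     # Indexa as palavras por tamanho
--     for pp in cp:
--
--         tamanho = str( palavra_tamanho(pp) )
--         cadeia  = palavra_potencial_para_cadeia(pp)
--
--         if tamanho in palavras:
--             palavras[tamanho].append(cadeia)
--         else:
--             palavras[tamanho] = [cadeia]
--
--     subconjuntos = []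
--
--     # Representa em string cada subconjunto
--     for n in sorted(palavras):
--         subconjuntos.append(n + '->[' + ', '.join( sorted(palavras[n]) ) + ']')
--
--     # Representa o conjunto total
--     return '[' + ';'.join(subconjuntos) + ']'
-- ===== SOURCE B (Python) =====
-- def conjunto_palavras_para_cadeia(cp):
--     """Same result as A: sorted distinct length-labels, then one filter+sort per label
--     (no dict-of-lists)."""
--     labels = sorted({str(len(pp[0])) for pp in cp})
--     partes = [lab + '->[' +
--               ', '.join(sorted(pp[0] for pp in cp if str(len(pp[0])) == lab)) + ']'
--               for lab in labels]
--     return '[' + ';'.join(partes) + ']'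
-- ===== Notes on version B (the rewrite author's own statement) =====
-- stated objective: alternative
-- what changed: Replaces A's dict-of-lists bucketing plus per-bucket sorting by computing the sorted set of distinct length-labels once and, for each label, filtering and sorting the matching words directly from the input.
import Mathlib
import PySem

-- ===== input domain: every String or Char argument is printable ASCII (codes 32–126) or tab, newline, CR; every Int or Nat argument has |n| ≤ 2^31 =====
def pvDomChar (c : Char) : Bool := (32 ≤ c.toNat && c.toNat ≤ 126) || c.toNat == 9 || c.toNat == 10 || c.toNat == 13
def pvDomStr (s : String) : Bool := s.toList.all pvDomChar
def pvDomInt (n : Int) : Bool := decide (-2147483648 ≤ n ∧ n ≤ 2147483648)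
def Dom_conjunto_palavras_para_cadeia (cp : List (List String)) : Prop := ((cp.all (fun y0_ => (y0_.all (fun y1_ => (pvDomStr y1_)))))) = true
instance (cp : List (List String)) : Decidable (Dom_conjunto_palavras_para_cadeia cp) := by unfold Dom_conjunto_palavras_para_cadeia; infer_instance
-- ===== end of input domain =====

-- B replaces A's dict-of-lists bucketing by a sorted set of distinct length-labels with one filter+sort per label (alternative decomposition, not faster).

-- ===== PORT A =====
def palavra_potencial_para_cadeia (pp : List String) : String :=
  -- pp[0]; raises IndexError on pp = [], excluded by Pre_
  PySem.List.pyGetD pp 0 ""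

def palavra_tamanho (pp : List String) : Int :=
  PySem.Str.len (palavra_potencial_para_cadeia pp)

def conjunto_palavras_para_cadeia (cp : List (List String)) : String :=
  let palavras : PySem.Dict String (List String) := cp.foldl (fun d pp =>
      let tamanho := PySem.Int.toStr (palavra_tamanho pp)
      let cadeia := palavra_potencial_para_cadeia pp
      if d.contains tamanho then d.insert tamanho (d.getD tamanho [] ++ [cadeia])
      else d.insert tamanho [cadeia]) PySem.Dict.empty
  let subconjuntos : List String := (PySem.List.sorted palavras.keys (fun x => x) false).foldl
      (fun acc n => acc ++ [n ++ "->[" ++ PySem.Str.join ", " (PySem.List.sorted (palavras.getD n []) (fun x => x) false) ++ "]"]) []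
  "[" ++ PySem.Str.join ";" subconjuntos ++ "]"

-- ===== PORT B =====
def conjunto_palavras_para_cadeia_alt (cp : List (List String)) : String :=
  let labels := PySem.List.sorted
      (PySem.Set.ofList (cp.map (fun pp => PySem.Int.toStr (PySem.Str.len (PySem.List.pyGetD pp 0 "")))))
      (fun x => x) false
  let partes := labels.map (fun lab =>
      lab ++ "->[" ++ PySem.Str.join ", "
        (PySem.List.sorted
          ((cp.filter (fun pp => PySem.Int.toStr (PySem.Str.len (PySem.List.pyGetD pp 0 "")) == lab)).map
            (fun pp => PySem.List.pyGetD pp 0 ""))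
          (fun x => x) false) ++ "]")
  "[" ++ PySem.Str.join ";" partes ++ "]"

-- ===== PRECONDITION & SPEC =====
-- Pre_ excludes inputs containing an empty word-list: there pp[0] raises IndexError in A (and in B).
def Pre_conjunto_palavras_para_cadeia (cp : List (List String)) : Prop := ∀ pp ∈ cp, pp ≠ []
instance (cp : List (List String)) : Decidable (Pre_conjunto_palavras_para_cadeia cp) := by unfold Pre_conjunto_palavras_para_cadeia; infer_instance

def pvWitness_conjunto_palavras_para_cadeia : List (List String) := [["abc"], ["de"], ["a", "x"], ["de"]]

def Spec_conjunto_palavras_para_cadeia (cp : List (List String)) (out : String) : Prop := out = conjunto_palavras_para_cadeia_alt cp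
instance (cp : List (List String)) (out : String) : Decidable (Spec_conjunto_palavras_para_cadeia cp out) := by unfold Spec_conjunto_palavras_para_cadeia; infer_instance

-- ===== CLAIM (what is proved, stated in full; the proofs are below) =====
def Claim_equal_conjunto_palavras_para_cadeia : Prop := ∀ (cp : List (List String)), Dom_conjunto_palavras_para_cadeia cp → Pre_conjunto_palavras_para_cadeia cp → Spec_conjunto_palavras_para_cadeia cp (conjunto_palavras_para_cadeia cp)

-- ===== LEMMAS AND PROOFS =====

-- A's if-contains-append-else-assign step is exactly Dict.modify with default []
theorem pv_step_eq_modify (d : PySem.Dict String (List String)) (k : String) (c : String) :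
    (if d.contains k then d.insert k (d.getD k [] ++ [c]) else d.insert k [c]) =
      d.modify k [] (fun l => l ++ [c]) := by
  unfold PySem.Dict.modify PySem.Dict.getD
  split <;> simp_all [PySem.Dict.contains_eq_isSome_get?]

-- A's dict is a modify-fold over the (label, word) pairs
theorem pv_dict_eq (cp : List (List String)) :
    (cp.foldl (fun d pp =>
      let tamanho := PySem.Int.toStr (palavra_tamanho pp)
      let cadeia := palavra_potencial_para_cadeia pp
      if d.contains tamanho then d.insert tamanho (d.getD tamanho [] ++ [cadeia])
      else d.insert tamanho [cadeia]) PySem.Dict.empty) =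
    (cp.map (fun pp => (PySem.Int.toStr (PySem.Str.len (PySem.List.pyGetD pp 0 "")), PySem.List.pyGetD pp 0 ""))).foldl
      (fun d p => d.modify p.1 [] (fun l => l ++ [p.2])) PySem.Dict.empty := by
  rw [List.foldl_map]
  apply PySem.List.foldl_congr_mem
  intro d pp _
  simp only [palavra_tamanho, palavra_potencial_para_cadeia]
  exact pv_step_eq_modify d _ _

-- the fold's buckets are B's filtered word lists
theorem pv_getD_eq (cp : List (List String)) (c : String) :
    ((cp.map (fun pp => (PySem.Int.toStr (PySem.Str.len (PySem.List.pyGetD pp 0 "")), PySem.List.pyGetD pp 0 ""))).foldl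
      (fun d p => d.modify p.1 [] (fun l => l ++ [p.2])) PySem.Dict.empty).getD c [] =
    (cp.filter (fun pp => PySem.Int.toStr (PySem.Str.len (PySem.List.pyGetD pp 0 "")) == c)).map (fun pp => PySem.List.pyGetD pp 0 "") := by
  rw [PySem.Dict.getD_foldl_modify_append]
  simp [List.filter_map, Function.comp_def]

-- the fold's key list is B's distinct label set
theorem pv_keys_eq (cp : List (List String)) :
    ((cp.map (fun pp => (PySem.Int.toStr (PySem.Str.len (PySem.List.pyGetD pp 0 "")), PySem.List.pyGetD pp 0 ""))).foldl
      (fun d p => d.modify p.1 [] (fun l => l ++ [p.2])) PySem.Dict.empty).keys =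
    PySem.Set.ofList (cp.map (fun pp => PySem.Int.toStr (PySem.Str.len (PySem.List.pyGetD pp 0 "")))) := by
  rw [PySem.Dict.keys_foldl_modify_key (key := Prod.fst)]
  simp [PySem.Set.ofList, PySem.Set.update, Function.comp_def]

-- ===== VERDICT (by name: the statement is the Claim_ definition above) =====
theorem conjunto_palavras_para_cadeia_spec : Claim_equal_conjunto_palavras_para_cadeia := by
  intro cp _ _
  unfold Spec_conjunto_palavras_para_cadeia conjunto_palavras_para_cadeia conjunto_palavras_para_cadeia_alt
  dsimp only
  rw [pv_dict_eq, pv_keys_eq, PySem.List.foldl_append_singleton_eq_map]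
  simp only [List.nil_append]
  congr 2
  congr 1
  apply List.map_congr_left
  intro n _
  rw [pv_getD_eq]
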